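-- pv_equiv track=rewrite | github.com/Kosw/2023-CST | instagram_debug.py | instagram_debug
-- ===== SOURCE A (Python) =====
-- def instagram_debug(a,b):
--   s = set(zip(a,b))
--   d = dict()
--   for i, _ in s:
--     if i in d:
--       d[i] += 1
--     else:
--       d[i] = 1
--   d1 = dict(sorted(d.items()))
--   return d1
-- ===== SOURCE B (Python) =====
-- def instagram_debug(a, b):
--     # Sort the zipped pairs once; duplicates become adjacent, so a single scan
--     # that skips elements equal to the previous one counts each distinct pair
--     # exactly once, and keys enter the result dict already in sorted order.
--     result = {}
--     prev = None
--     for p in sorted(zip(a, b)):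
--         if p != prev:
--             result[p[0]] = result.get(p[0], 0) + 1
--             prev = p
--     return result
-- ===== Notes on version B (the rewrite author's own statement) =====
-- stated objective: alternative
-- what changed: Replaces A's hash-set deduplication, hash-dict counting loop and final item sort with a sort-then-scan algorithm: sort zip(a,b) once, then one linear scan that skips adjacent duplicates and bumps the count of the current key, so no set is built and keys arrive in sorted order by construction.
import Mathlib
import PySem

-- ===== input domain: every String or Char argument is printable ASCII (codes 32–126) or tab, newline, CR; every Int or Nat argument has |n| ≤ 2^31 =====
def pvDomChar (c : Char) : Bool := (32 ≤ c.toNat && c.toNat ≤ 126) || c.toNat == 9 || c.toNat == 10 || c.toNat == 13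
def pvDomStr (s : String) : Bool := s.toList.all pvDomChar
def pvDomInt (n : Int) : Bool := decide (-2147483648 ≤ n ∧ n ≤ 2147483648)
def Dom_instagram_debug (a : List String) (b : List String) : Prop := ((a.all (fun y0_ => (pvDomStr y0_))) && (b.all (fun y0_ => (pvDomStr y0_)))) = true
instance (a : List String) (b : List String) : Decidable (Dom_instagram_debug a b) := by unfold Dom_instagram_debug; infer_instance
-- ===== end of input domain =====

-- B replaces A's hash-set deduplication, counting dict and final item sort by a
-- sort-then-scan: sort zip(a,b) once, then one linear scan that skips adjacent
-- duplicates and bumps the current key's count; keys arrive already sorted.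

-- ===== PORT A =====
def instagram_debug (a : List String) (b : List String) : List (String × Int) :=
  let s : PySem.Set (String × String) := PySem.Set.ofList (a.zip b)
  let d : PySem.Dict String Int :=
    s.foldl (fun d p =>
      if d.contains p.1 then d.insert p.1 (d.getD p.1 0 + 1) else d.insert p.1 1)
      PySem.Dict.empty
  let d1 : PySem.Dict String Int :=
    PySem.Dict.ofList (PySem.List.sorted2 d.items (fun p => p.1) (fun p => p.2))
  d1.items

-- ===== PORT B =====
def instagram_debug_alt (a : List String) (b : List String) : List (String × Int) :=
  ((PySem.List.sorted2 (a.zip b) (fun p => p.1) (fun p => p.2)).foldl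
      (fun (st : PySem.Dict String Int × Option (String × String)) p =>
        if some p ≠ st.2 then (st.1.insert p.1 (st.1.getD p.1 0 + 1), some p) else st)
      (PySem.Dict.empty, none)).1.items

-- ===== PRECONDITION & SPEC =====
def Spec_instagram_debug (a : List String) (b : List String) (out : List (String × Int)) : Prop := out = instagram_debug_alt a b
instance (a : List String) (b : List String) (out : List (String × Int)) : Decidable (Spec_instagram_debug a b out) := by unfold Spec_instagram_debug; infer_instance

-- ===== CLAIM (what is proved, stated in full; the proofs are below) =====
def Claim_equal_instagram_debug : Prop := ∀ (a : List String) (b : List String), Dom_instagram_debug a b → Spec_instagram_debug a b (instagram_debug a b)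

-- ===== LEMMAS AND PROOFS =====

-- the strict lexicographic order on pairs of strings, and sorted2's comparator
def pvLt (p q : String × String) : Prop := p.1 < q.1 ∨ (p.1 = q.1 ∧ p.2 < q.2)

def pvCmp (p q : String × String) : Bool :=
  decide (p.1 < q.1) || !decide (q.1 < p.1) && decide (p.2 < q.2)

theorem pvCmp_iff (p q : String × String) : pvCmp p q = true ↔ pvLt p q := by
  unfold pvCmp pvLt
  rcases lt_trichotomy p.1 q.1 with h | h | h
  · simp [h, asymm h]
  · simp [h]
  · have h1 : ¬ p.1 < q.1 := asymm h
    have h2 : p.1 ≠ q.1 := fun e => absurd (e ▸ h) (lt_irrefl q.1)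
    simp [h, h1, h2]

theorem pvLt_irrefl (p : String × String) : ¬ pvLt p p := by
  unfold pvLt; simp

theorem pvLt_trans {p q r : String × String} (h1 : pvLt p q) (h2 : pvLt q r) : pvLt p r := by
  unfold pvLt at *
  rcases h1 with h1 | ⟨e1, h1⟩ <;> rcases h2 with h2 | ⟨e2, h2⟩
  · exact Or.inl (lt_trans h1 h2)
  · exact Or.inl (e2 ▸ h1)
  · exact Or.inl (e1 ▸ h2)
  · exact Or.inr ⟨e1.trans e2, lt_trans h1 h2⟩

theorem pvLt_asymm {p q : String × String} (h : pvLt p q) : ¬ pvLt q p :=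
  fun h' => pvLt_irrefl p (pvLt_trans h h')

theorem pvLt_total (p q : String × String) : pvLt p q ∨ p = q ∨ pvLt q p := by
  unfold pvLt
  rcases lt_trichotomy p.1 q.1 with h | h | h
  · exact Or.inl (Or.inl h)
  · rcases lt_trichotomy p.2 q.2 with h' | h' | h'
    · exact Or.inl (Or.inr ⟨h, h'⟩)
    · exact Or.inr (Or.inl (Prod.ext h h'))
    · exact Or.inr (Or.inr (Or.inr ⟨h.symm, h'⟩))
  · exact Or.inr (Or.inr (Or.inl h))

-- insertion with sorted2's comparator preserves being sorted (non-strictly) for pvLt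
theorem pv_insert_pairwise (x : String × String) :
    ∀ acc : List (String × String), acc.Pairwise (fun a b => ¬ pvLt b a) →
    (PySem.List.insertBy pvCmp x acc).Pairwise (fun a b => ¬ pvLt b a) := by
  intro acc
  induction acc with
  | nil => intro _; simp [PySem.List.insertBy]
  | cons y ys ih =>
    intro h
    rw [List.pairwise_cons] at h
    obtain ⟨hy, hys⟩ := h
    simp only [PySem.List.insertBy]
    by_cases hc : pvCmp x y = true
    · simp only [hc, if_true]
      have hxy : pvLt x y := (pvCmp_iff x y).mp hc
      refine List.Pairwise.cons ?_ (List.Pairwise.cons hy hys)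
      intro z hz
      rcases List.mem_cons.mp hz with rfl | hz
      · exact pvLt_asymm hxy
      · exact fun hzx => (hy z hz) (pvLt_trans hzx hxy)
    · simp only [hc]
      refine List.Pairwise.cons ?_ (ih hys)
      intro z hz
      rcases (PySem.List.mem_insertBy _ _ _ _).mp hz with h' | hz
      · cases h'; exact fun hl => hc ((pvCmp_iff _ _).mpr hl)
      · exact hy z hz

theorem pv_foldl_insert_pairwise :
    ∀ (l acc : List (String × String)), acc.Pairwise (fun a b => ¬ pvLt b a) →
    (l.foldl (fun acc x => PySem.List.insertBy pvCmp x acc) acc).Pairwise (fun a b => ¬ pvLt b a) := by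
  intro l
  induction l with
  | nil => intro acc h; exact h
  | cons x t ih => intro acc h; exact ih _ (pv_insert_pairwise x acc h)

theorem pv_sorted2_eq (xs : List (String × String)) :
    PySem.List.sorted2 xs (fun p => p.1) (fun p => p.2)
      = xs.foldl (fun acc x => PySem.List.insertBy pvCmp x acc) [] := rfl

theorem pv_sorted2_pairwise (xs : List (String × String)) :
    (PySem.List.sorted2 xs (fun p => p.1) (fun p => p.2)).Pairwise (fun a b => ¬ pvLt b a) := by
  rw [pv_sorted2_eq]
  exact pv_foldl_insert_pairwise xs [] (by simp)

-- adjacent-duplicate removal relative to a "previous element" (proof-only model of B's scan)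
def pvDedup : Option (String × String) → List (String × String) → List (String × String)
  | _, [] => []
  | prev, x :: t => if some x ≠ prev then x :: pvDedup (some x) t else pvDedup prev t

-- B's scan IS: remove adjacent duplicates, then the plain counting fold
theorem pv_fold_eq :
    ∀ (l : List (String × String)) (d : PySem.Dict String Int) (prev : Option (String × String)),
    (l.foldl (fun (st : PySem.Dict String Int × Option (String × String)) p =>
        if some p ≠ st.2 then (st.1.insert p.1 (st.1.getD p.1 0 + 1), some p) else st) (d, prev)).1
      = (pvDedup prev l).foldl (fun d (x : String × String) => d.insert x.1 (d.getD x.1 0 + 1)) d := by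
  intro l
  induction l with
  | nil => intro d prev; rfl
  | cons x t ih =>
    intro d prev
    simp only [List.foldl_cons, pvDedup]
    by_cases h : some x ≠ prev
    · rw [if_pos h, if_pos h, List.foldl_cons]
      exact ih _ _
    · rw [if_neg h, if_neg h]
      exact ih _ _

theorem pv_mem_pvDedup :
    ∀ (l : List (String × String)) (prev : Option (String × String)) (x : String × String),
    x ∈ l → x ∈ pvDedup prev l ∨ some x = prev := by
  intro l
  induction l with
  | nil => intro prev x h; cases h
  | cons y t ih =>
    intro prev x h
    simp only [pvDedup]
    by_cases hy : some y ≠ prev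
    · rw [if_pos hy]
      rcases List.mem_cons.mp h with rfl | h
      · exact Or.inl (List.mem_cons_self)
      · rcases ih (some y) x h with h' | h'
        · exact Or.inl (List.mem_cons_of_mem _ h')
        · exact Or.inl (Option.some_inj.mp h' ▸ List.mem_cons_self)
    · rw [if_neg hy]
      rcases List.mem_cons.mp h with rfl | h
      · exact Or.inr (not_not.mp hy)
      · exact ih prev x h

-- on a sorted list, pvDedup yields a strictly increasing sublist with the same members
theorem pv_pvDedup_spec :
    ∀ (l : List (String × String)) (prev : Option (String × String)),
    l.Pairwise (fun a b => ¬ pvLt b a) →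
    (∀ q, prev = some q → ∀ x ∈ l, ¬ pvLt x q) →
    (pvDedup prev l).Pairwise pvLt ∧
      (∀ q, prev = some q → ∀ x ∈ pvDedup prev l, pvLt q x) ∧
      (∀ x ∈ pvDedup prev l, x ∈ l) := by
  intro l
  induction l with
  | nil => intro prev _ _; exact ⟨List.Pairwise.nil, fun _ _ _ h => absurd h (List.not_mem_nil), fun _ h => absurd h (List.not_mem_nil)⟩
  | cons x t ih =>
    intro prev hsort hprev
    rw [List.pairwise_cons] at hsort
    obtain ⟨hx, ht⟩ := hsort
    simp only [pvDedup]
    by_cases hne : some x ≠ prev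
    · rw [if_pos hne]
      obtain ⟨ih1, ih2, ih3⟩ := ih (some x) ht (fun q hq y hy => by
        cases Option.some_inj.mp hq; exact hx y hy)
      refine ⟨?_, ?_, ?_⟩
      · exact List.Pairwise.cons (fun z hz => ih2 x rfl z hz) ih1
      · intro q hq z hz
        cases hq
        have hqx : pvLt q x := by
          rcases pvLt_total q x with h | h | h
          · exact h
          · exact absurd (congrArg some h.symm) hne
          · exact absurd h (hprev q rfl x List.mem_cons_self)
        rcases List.mem_cons.mp hz with rfl | hz
        · exact hqx
        · exact pvLt_trans hqx (ih2 x rfl z hz)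
      · intro z hz
        rcases List.mem_cons.mp hz with rfl | hz
        · exact List.mem_cons_self
        · exact List.mem_cons_of_mem _ (ih3 z hz)
    · rw [if_neg hne]
      have hxprev : some x = prev := not_not.mp hne
      obtain ⟨ih1, ih2, ih3⟩ := ih prev ht (fun q hq y hy => by
        cases hxprev ▸ hq
        exact hx y hy)
      exact ⟨ih1, ih2, fun z hz => List.mem_cons_of_mem _ (ih3 z hz)⟩

-- set(xs) (insertion-ordered dedup) is a sublist of xs
theorem pv_foldl_add_sublist {α : Type} [DecidableEq α] :
    ∀ (l s : List α), ∃ t, t.Sublist l ∧ l.foldl PySem.Set.add s = s ++ t := by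
  intro l
  induction l with
  | nil => intro s; exact ⟨[], List.Sublist.refl _, by simp⟩
  | cons x l' ih =>
    intro s
    simp only [List.foldl_cons]
    by_cases h : x ∈ s
    · obtain ⟨t, hsub, heq⟩ := ih s
      refine ⟨t, hsub.cons _, ?_⟩
      rwa [show PySem.Set.add s x = s by simp [PySem.Set.add, PySem.Set.contains, h]]
    · obtain ⟨t, hsub, heq⟩ := ih (s ++ [x])
      refine ⟨x :: t, hsub.cons₂ _, ?_⟩
      rw [show PySem.Set.add s x = s ++ [x] by simp [PySem.Set.add, PySem.Set.contains, h]]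
      rw [heq, List.append_assoc]
      rfl

theorem pv_ofList_sublist {α : Type} [DecidableEq α] (l : List α) :
    (PySem.Set.ofList l : List α).Sublist l := by
  obtain ⟨t, hsub, heq⟩ := pv_foldl_add_sublist l ([] : List α)
  rw [PySem.Set.ofList_eq_foldl, heq]
  simpa using hsub

-- (A-side) insertBy with two comparators that agree on all pairs drawn from x and the list
theorem pv_insertBy_congr {α : Type} (f g : α → α → Bool) (x : α) (acc : List α)
    (h : ∀ a ∈ acc, f x a = g x a) :
    PySem.List.insertBy f x acc = PySem.List.insertBy g x acc := by
  induction acc with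
  | nil => rfl
  | cons y ys ih =>
    simp only [PySem.List.insertBy]
    rw [h y (by simp)]
    by_cases hg : g x y = true
    · simp [hg]
    · simp only [hg]
      rw [ih (fun a ha => h a (by simp [ha]))]

theorem pv_foldl_insertBy_congr {α : Type} (f g : α → α → Bool) :
    ∀ (xs acc : List α), (∀ a ∈ xs, ∀ b ∈ xs ++ acc, f a b = g a b) →
    xs.foldl (fun acc x => PySem.List.insertBy f x acc) acc
      = xs.foldl (fun acc x => PySem.List.insertBy g x acc) acc := by
  intro xs
  induction xs with
  | nil => intro acc _; rfl
  | cons x t ih =>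
    intro acc h
    simp only [List.foldl_cons]
    rw [pv_insertBy_congr f g x acc (fun a ha => h x (by simp) a (by simp [ha]))]
    apply ih
    intro a ha b hb
    apply h a (by simp [ha])
    rcases List.mem_append.mp hb with hb | hb
    · simp [hb]
    · rcases (PySem.List.mem_insertBy _ _ _ _).mp hb with rfl | hb
      · simp
      · simp [hb]

-- (A-side) on a list whose first components are distinct, Python's tuple sort is the sort by first component
theorem pv_sorted2_eq_sorted_fst (xs : List (String × Int))
    (h : (xs.map Prod.fst).Nodup) :
    PySem.List.sorted2 xs (fun p => p.1) (fun p => p.2)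
      = PySem.List.sorted xs (fun p => p.1) := by
  rw [PySem.List.sorted_eq_foldl_insertBy]
  simp only [PySem.List.sorted2]
  apply pv_foldl_insertBy_congr
  intro a ha b hb
  rw [List.append_nil] at hb
  by_cases hab : a = b
  · subst hab; simp
  · have hne : a.1 ≠ b.1 := fun hfst =>
      hab (List.inj_on_of_nodup_map h ha hb hfst)
    by_cases hlt : a.1 < b.1
    · simp [hlt]
    · have hgt : b.1 < a.1 := lt_of_le_of_ne (not_lt.mp hlt) (Ne.symm hne)
      simp [hlt, hgt]

-- main equality
theorem pv_main (a b : List String) : instagram_debug a b = instagram_debug_alt a b := by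
  simp only [instagram_debug, instagram_debug_alt]
  -- A's counting step always inserts getD+1 (when the key is absent, getD is 0)
  have hstep : (fun (d : PySem.Dict String Int) (p : String × String) =>
      if d.contains p.1 then d.insert p.1 (d.getD p.1 0 + 1) else d.insert p.1 1)
      = fun (d : PySem.Dict String Int) (p : String × String) =>
          d.insert p.1 (d.getD p.1 0 + 1) := by
    funext d p
    by_cases h : d.contains p.1 = true
    · simp [h]
    · have hn : d.get? p.1 = none := by
        rw [PySem.Dict.contains_eq_isSome_get?] at h
        exact Option.not_isSome_iff_eq_none.mp (by simpa using h)
      have h0 : d.getD p.1 0 = 0 := by simp [PySem.Dict.getD, hn]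
      simp [h, h0]
  rw [hstep, ← List.foldl_map (f := Prod.fst)
      (g := fun (d : PySem.Dict String Int) (x : String) => d.insert x (d.getD x 0 + 1)),
    PySem.Dict.foldl_insert_getD_add_one_eq_counter,
    PySem.Dict.items_counter]
  -- B's scan: dedup the sorted list, then the counting fold, which is Counter of the keys
  rw [pv_fold_eq, ← List.foldl_map (f := Prod.fst)
      (g := fun (d : PySem.Dict String Int) (x : String) => d.insert x (d.getD x 0 + 1)),
    PySem.Dict.foldl_insert_getD_add_one_eq_counter,
    PySem.Dict.items_counter]
  -- names for the two key lists
  have hS := pv_sorted2_pairwise (a.zip b)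
  obtain ⟨hDlt, -, hDsub⟩ := pv_pvDedup_spec
    (PySem.List.sorted2 (a.zip b) (fun p => p.1) (fun p => p.2)) none hS
    (fun q hq => by cases hq)
  have hDnodup : (pvDedup none (PySem.List.sorted2 (a.zip b) (fun p => p.1) (fun p => p.2))).Nodup :=
    List.Pairwise.imp (fun {p q} (h : pvLt p q) (e : p = q) => pvLt_irrefl q (e ▸ h)) hDlt
  have hDperm : (pvDedup none (PySem.List.sorted2 (a.zip b) (fun p => p.1) (fun p => p.2))).Perm
      (PySem.Set.ofList (a.zip b)) := by
    refine (List.perm_ext_iff_of_nodup hDnodup (PySem.Set.nodup_ofList _)).mpr ?_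
    intro x
    constructor
    · intro hx
      rw [PySem.Set.mem_ofList]
      exact (PySem.List.sorted2_perm _ _ _ _).mem_iff.mp (hDsub x hx)
    · intro hx
      rw [PySem.Set.mem_ofList] at hx
      have hxS : x ∈ PySem.List.sorted2 (a.zip b) (fun p => p.1) (fun p => p.2) :=
        (PySem.List.sorted2_perm _ _ _ _).mem_iff.mpr hx
      rcases pv_mem_pvDedup _ none x hxS with h | h
      · exact h
      · cases h
  have hDfperm : ((pvDedup none (PySem.List.sorted2 (a.zip b) (fun p => p.1) (fun p => p.2))).map Prod.fst).Perm
      ((PySem.Set.ofList (a.zip b)).map Prod.fst) := hDperm.map _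
  -- B's counts equal A's counts
  have hg : (fun k => (k, (((pvDedup none (PySem.List.sorted2 (a.zip b) (fun p => p.1) (fun p => p.2))).map Prod.fst).count k : Int)))
      = fun k => (k, (((PySem.Set.ofList (a.zip b)).map Prod.fst).count k : Int)) := by
    funext k
    rw [hDfperm.count_eq]
  rw [hg]
  -- B's key set is a permutation of A's key set
  have hkeysperm : (PySem.Set.ofList ((pvDedup none (PySem.List.sorted2 (a.zip b) (fun p => p.1) (fun p => p.2))).map Prod.fst) : List String).Perm
      (PySem.Set.ofList ((PySem.Set.ofList (a.zip b)).map Prod.fst)) := by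
    refine (List.perm_ext_iff_of_nodup (PySem.Set.nodup_ofList _) (PySem.Set.nodup_ofList _)).mpr ?_
    intro k
    rw [PySem.Set.mem_ofList, PySem.Set.mem_ofList, hDfperm.mem_iff]
  -- B's key set is strictly increasing
  have hDfle : ((pvDedup none (PySem.List.sorted2 (a.zip b) (fun p => p.1) (fun p => p.2))).map Prod.fst).Pairwise (· ≤ ·) := by
    refine List.pairwise_map.mpr (hDlt.imp ?_)
    intro p q h
    rcases h with h | ⟨e, _⟩
    · exact le_of_lt h
    · exact le_of_eq e
  have hkeyslt : (PySem.Set.ofList ((pvDedup none (PySem.List.sorted2 (a.zip b) (fun p => p.1) (fun p => p.2))).map Prod.fst) : List String).Pairwise (· < ·) := by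
    have hle := hDfle.sublist (pv_ofList_sublist _)
    have hne : (PySem.Set.ofList ((pvDedup none (PySem.List.sorted2 (a.zip b) (fun p => p.1) (fun p => p.2))).map Prod.fst) : List String).Pairwise (· ≠ ·) :=
      PySem.Set.nodup_ofList _
    exact (hle.and hne).imp (fun {x y} h => lt_of_le_of_ne h.1 h.2)
  -- A's final dict(sorted(...)) is the sorted list itself
  have hndK : ((PySem.Set.ofList ((PySem.Set.ofList (a.zip b)).map Prod.fst)) : List String).Nodup :=
    PySem.Set.nodup_ofList _
  have hperm2 : (PySem.List.sorted2
      ((PySem.Set.ofList ((PySem.Set.ofList (a.zip b)).map Prod.fst)).map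
        (fun k => (k, (((PySem.Set.ofList (a.zip b)).map Prod.fst).count k : Int))))
      (fun p => p.1) (fun p => p.2)).Perm
      ((PySem.Set.ofList ((PySem.Set.ofList (a.zip b)).map Prod.fst)).map
        (fun k => (k, (((PySem.Set.ofList (a.zip b)).map Prod.fst).count k : Int)))) :=
    PySem.List.sorted2_perm _ _ _ _
  have hmap1 : List.map Prod.fst
      ((PySem.Set.ofList ((PySem.Set.ofList (a.zip b)).map Prod.fst)).map
        (fun k => (k, (((PySem.Set.ofList (a.zip b)).map Prod.fst).count k : Int))))
      = PySem.Set.ofList ((PySem.Set.ofList (a.zip b)).map Prod.fst) := by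
    rw [List.map_map]; simp [Function.comp_def]
  have hndA : ((PySem.List.sorted2
      ((PySem.Set.ofList ((PySem.Set.ofList (a.zip b)).map Prod.fst)).map
        (fun k => (k, (((PySem.Set.ofList (a.zip b)).map Prod.fst).count k : Int))))
      (fun p => p.1) (fun p => p.2)).map Prod.fst).Nodup := by
    refine ((hperm2.map Prod.fst).nodup_iff).mpr ?_
    rw [hmap1]; exact hndK
  simp only [PySem.Dict.ofList, PySem.Dict.update]
  rw [PySem.Dict.items_foldl_insert_fresh
      (l := PySem.List.sorted2
        ((PySem.Set.ofList ((PySem.Set.ofList (a.zip b)).map Prod.fst)).map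
          (fun k => (k, (((PySem.Set.ofList (a.zip b)).map Prod.fst).count k : Int))))
        (fun p => p.1) (fun p => p.2))
      (k := fun p : String × Int => p.1) (v := fun p : String × Int => p.2)
      (d := PySem.Dict.empty) (fun a _ => rfl) hndA]
  simp only [Prod.mk.eta, List.map_id',
    show (PySem.Dict.empty : PySem.Dict String Int).items = [] from rfl, List.nil_append]
  -- identify the two sorted lists
  rw [pv_sorted2_eq_sorted_fst _ (by rw [hmap1]; exact hndK)]
  apply PySem.List.sorted_eq_of_perm_of_pairwise_lt
  · exact hkeysperm.map _
  · refine List.pairwise_map.mpr (hkeyslt.imp ?_)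
    intro x y h
    exact h

-- ===== VERDICT (by name: the statement is the Claim_ definition above) =====
theorem instagram_debug_spec : Claim_equal_instagram_debug := by
  intro a b _
  unfold Spec_instagram_debug
  exact pv_main a b
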